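-- pv_equiv track=rewrite | github.com/jlfowler1084/CareerPilot | src/jobs/applicant.py | batch_select
-- ===== SOURCE A (Python) =====
-- from typing import Dict, List, Optional
--
-- def batch_select(job_list: List[Dict], selection: str) -> List[Dict]:
--     """Parse user selection and return the selected jobs.
--
--     Args:
--         job_list: List of job dicts (1-indexed display assumed).
--         selection: User input — comma-separated numbers, ranges (e.g. '1-3'),
--                    or 'all'.
--
--     Returns:
--         List of selected job dicts.
--     """
--     if selection.strip().lower() == "all":
--         return list(job_list)
--
--     indices = set()
--     for part in selection.split(","):
--         part = part.strip()
--         if "-" in part: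
--             try:
--                 start, end = part.split("-", 1)
--                 for i in range(int(start), int(end) + 1):
--                     indices.add(i)
--             except (ValueError, TypeError):
--                 continue
--         else:
--             try:
--                 indices.add(int(part))
--             except ValueError:
--                 continue
--
--     selected = []
--     for idx in sorted(indices):
--         if 1 <= idx <= len(job_list):
--             selected.append(job_list[idx - 1])
--     return selected
-- ===== SOURCE B (Python) =====
-- def batch_select(job_list, selection):
--     if selection.strip().lower() == "all":
--         return list(job_list)
--
--     indices = set()
--     for part in selection.split(","):
--         part = part.strip()
--         if "-" in part:
--             try:
--                 start, end = part.split("-", 1)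
--                 for i in range(int(start), int(end) + 1):
--                     indices.add(i)
--             except (ValueError, TypeError):
--                 continue
--         else:
--             try:
--                 indices.add(int(part))
--             except ValueError:
--                 continue
--
--     return [job for i, job in enumerate(job_list) if i + 1 in indices]
-- ===== Notes on version B (the rewrite author's own statement) =====
-- stated objective: idiomatic
-- what changed: The final phase drops sorted(indices) and indexing job_list[idx-1] entirely: B scans job_list once with enumerate and keeps each job whose 1-based position is in the index set, which yields the same ascending order without a sort.
import Mathlib
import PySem

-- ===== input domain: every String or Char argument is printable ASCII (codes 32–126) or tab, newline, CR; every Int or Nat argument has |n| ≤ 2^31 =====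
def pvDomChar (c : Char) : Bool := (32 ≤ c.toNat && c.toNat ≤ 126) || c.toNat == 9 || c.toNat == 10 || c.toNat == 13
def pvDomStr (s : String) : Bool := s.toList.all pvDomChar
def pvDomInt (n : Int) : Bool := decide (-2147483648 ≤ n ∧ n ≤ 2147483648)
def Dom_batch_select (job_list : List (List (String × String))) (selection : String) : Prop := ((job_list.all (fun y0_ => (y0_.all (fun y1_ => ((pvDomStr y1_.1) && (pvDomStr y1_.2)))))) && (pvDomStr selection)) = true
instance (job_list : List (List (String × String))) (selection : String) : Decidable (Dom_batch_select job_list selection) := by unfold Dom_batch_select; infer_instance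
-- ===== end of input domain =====

-- B replaces sort-the-index-set-then-index with a single enumerate scan of job_list filtered by set membership (idiomatic; same cost class).


-- ===== PORT A =====
-- shared by both ports: the parsing loop building the set of integer indices
-- (identical, line for line, in Source A and Source B)
def pvParseIndices (selection : String) : PySem.Set Int :=
  ((PySem.Str.split? selection ",").getD []).foldl (fun indices part0 =>
    let part := PySem.Str.strip part0
    if PySem.Str.isIn "-" part then
      -- try: start, end = part.split("-", 1); range(int(start), int(end)+1) — ValueError → continue
      match PySem.Str.splitMax? part "-" 1 with
      | some [s, e] =>
        match PySem.Int.ofStr? s, PySem.Int.ofStr? e with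
        | some a, some b => (PySem.List.pyRange a (b + 1) 1).foldl PySem.Set.add indices
        | _, _ => indices
      | _ => indices
    else
      match PySem.Int.ofStr? part with
      | some v => PySem.Set.add indices v
      | none => indices) PySem.Set.empty

def batch_select (job_list : List (List (String × String))) (selection : String) : List (List (String × String)) :=
  if PySem.Str.lower (PySem.Str.strip selection) = "all" then job_list
  else
    let indices := pvParseIndices selection
    (PySem.List.sorted indices (fun x => x) false).foldl
      (fun selected idx =>
        if 1 ≤ idx ∧ idx ≤ PySem.List.len job_list then
          selected ++ [PySem.List.pyGetD job_list (idx - 1) []]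
        else selected) []

-- ===== PORT B =====
def batch_select_alt (job_list : List (List (String × String))) (selection : String) : List (List (String × String)) :=
  if PySem.Str.lower (PySem.Str.strip selection) = "all" then job_list
  else
    let indices := pvParseIndices selection
    (((PySem.List.enumerate job_list 0).filter
        (fun p => PySem.Set.contains indices (p.1 + 1))).map (fun p => p.2))

-- ===== PRECONDITION & SPEC =====
def Spec_batch_select (job_list : List (List (String × String))) (selection : String) (out : List (List (String × String))) : Prop := out = batch_select_alt job_list selection
instance (job_list : List (List (String × String))) (selection : String) (out : List (List (String × String))) : Decidable (Spec_batch_select job_list selection out) := by unfold Spec_batch_select; infer_instance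

-- ===== CLAIM (what is proved, stated in full; the proofs are below) =====
def Claim_equal_batch_select : Prop := ∀ (job_list : List (List (String × String))) (selection : String), Dom_batch_select job_list selection → Spec_batch_select job_list selection (batch_select job_list selection)

-- ===== LEMMAS AND PROOFS =====

-- the parsing loop only ever grows a Set with Set.add, so its result is Nodup
theorem pvNodup_foldl_add (l : List Int) (s : PySem.Set Int) (h : s.Nodup) :
    (l.foldl PySem.Set.add s).Nodup := by
  induction l generalizing s with
  | nil => exact h
  | cons x t ih => exact ih _ (PySem.Set.nodup_add _ _ h)

theorem pvNodup_parse (selection : String) : (pvParseIndices selection).Nodup := by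
  unfold pvParseIndices
  generalize ((PySem.Str.split? selection ",").getD []) = parts
  have : ∀ (ps : List String) (s : PySem.Set Int), s.Nodup →
      (ps.foldl (fun indices part0 =>
        let part := PySem.Str.strip part0
        if PySem.Str.isIn "-" part then
          match PySem.Str.splitMax? part "-" 1 with
          | some [a, b] =>
            match PySem.Int.ofStr? a, PySem.Int.ofStr? b with
            | some a, some b => (PySem.List.pyRange a (b + 1) 1).foldl PySem.Set.add indices
            | _, _ => indices
          | _ => indices
        else
          match PySem.Int.ofStr? part with
          | some v => PySem.Set.add indices v
          | none => indices) s).Nodup := by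
    intro ps
    induction ps with
    | nil => intro s h; exact h
    | cons p t ih =>
      intro s h
      simp only [List.foldl_cons]
      apply ih
      dsimp only
      split
      · split
        · split
          · exact pvNodup_foldl_add _ _ h
          · exact h
        · exact h
      · split
        · exact PySem.Set.nodup_add _ _ h
        · exact h
  exact this _ _ (by simp [PySem.Set.empty])

-- two strictly increasing Int lists with the same members are equal
theorem pvEq_of_pairwise_lt_of_mem {xs ys : List Int}
    (hx : xs.Pairwise (· < ·)) (hy : ys.Pairwise (· < ·))
    (hmem : ∀ a, a ∈ xs ↔ a ∈ ys) : xs = ys := by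
  have hnx : xs.Nodup := hx.imp (fun h => ne_of_lt h)
  have hny : ys.Nodup := hy.imp (fun h => ne_of_lt h)
  have hperm : xs.Perm ys := (List.perm_ext_iff_of_nodup hnx hny).2 hmem
  exact hperm.eq_of_pairwise (fun a b _ _ h1 h2 => absurd h2 (not_lt.2 h1.le)) hx hy

-- A's append loop with a Prop guard, as filter-then-map
theorem pvFoldl_append_if {a b : Type} (p : a → Prop) [DecidablePred p] (f : a → b)
    (l : List a) (acc : List b) :
    l.foldl (fun acc x => if p x then acc ++ [f x] else acc) acc
      = acc ++ (l.filter (fun x => decide (p x))).map f := by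
  induction l generalizing acc with
  | nil => simp
  | cons x t ih =>
    by_cases h : p x
    · simp [h, ih]
    · simp [h, ih]

-- core: A's sorted-fold equals B's enumerate-filter, for any Nodup index set
theorem pvCore (js : List (List (String × String))) (S : PySem.Set Int) (hS : S.Nodup) :
    (PySem.List.sorted S (fun x => x) false).foldl
      (fun selected idx =>
        if 1 ≤ idx ∧ idx ≤ PySem.List.len js then
          selected ++ [PySem.List.pyGetD js (idx - 1) []]
        else selected) []
    = ((PySem.List.enumerate js 0).filter
        (fun p => PySem.Set.contains S (p.1 + 1))).map (fun p => p.2) := by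
  set T := PySem.List.sorted S (fun x => x) false with hT
  -- T is strictly increasing
  have hTle : T.Pairwise (· ≤ ·) := by
    have := PySem.List.sorted_pairwise S (fun x => x)
    simpa using this
  have hTnd : T.Nodup := ((PySem.List.sorted_perm S (fun x => x) false).nodup_iff).2 hS
  have hTlt : T.Pairwise (· < ·) := by
    have h := List.Pairwise.and hTle hTnd
    exact h.imp (fun ⟨h1, h2⟩ => lt_of_le_of_ne h1 h2)
  have hTmem : ∀ a, a ∈ T ↔ a ∈ S := fun a => PySem.List.mem_sorted S (fun x => x) false a
  -- A's side: fold = filter-then-map over T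
  rw [pvFoldl_append_if (fun idx => 1 ≤ idx ∧ idx ≤ PySem.List.len js)
      (fun idx => PySem.List.pyGetD js (idx - 1) []) T []]
  -- B's side: enumerate as a range map
  rw [PySem.List.enumerate_eq_map_pyRange js []]
  rw [List.filter_map, List.map_map]
  simp only [Function.comp_def]
  -- index lists coincide
  have hidx : T.filter (fun idx => decide (1 ≤ idx ∧ idx ≤ PySem.List.len js))
      = ((PySem.List.pyRange 0 (PySem.List.len js) 1).filter
          (fun j => PySem.Set.contains S (j + 1))).map (fun j => j + 1) := by
    apply pvEq_of_pairwise_lt_of_mem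
    · exact hTlt.filter _
    · have h1 := PySem.List.pairwise_lt_pyRange_one (a := 0) (b := PySem.List.len js)
      have h2 := h1.filter (fun j => PySem.Set.contains S (j + 1))
      exact (List.pairwise_map.2 (h2.imp (fun h => by omega)))
    · intro a
      simp only [List.mem_filter, List.mem_map, PySem.List.mem_pyRange_one,
        PySem.Set.contains_iff, decide_eq_true_eq, hTmem]
      constructor
      · rintro ⟨ha, h1, h2⟩
        exact ⟨a - 1, ⟨⟨by omega, by omega⟩, by simpa [hTmem] using ha⟩, by omega⟩
      · rintro ⟨j, ⟨⟨hj0, hjn⟩, hmem⟩, rfl⟩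
        exact ⟨hmem, by omega, by omega⟩
  rw [hidx, List.map_map]
  apply List.map_congr_left
  intro j hj
  simp only [Function.comp_def]
  congr 1
  omega

-- ===== VERDICT (by name: the statement is the Claim_ definition above) =====
theorem batch_select_spec : Claim_equal_batch_select := by
  intro job_list selection _
  unfold Spec_batch_select batch_select batch_select_alt
  split
  · rfl
  · exact pvCore job_list (pvParseIndices selection) (pvNodup_parse selection)
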